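-- pv_equiv track=rewrite | github.com/SSCT-Lab/NLPLego | grammar_check.py | filter_pp_in_sbar
-- ===== SOURCE A (Python) =====
-- def filter_pp_in_sbar(sbar_list, pp_list):
--     if len(sbar_list) > 0:
--         res_pp = list(pp_list)
--         for pp in pp_list:
--             for sbar in sbar_list:
--                 if pp[1] in sbar[1]:
--                     if pp in res_pp:
--                         res_pp.remove(pp)
--                 else:
--                     if " ".join(pp[1].split(" ")[-2:]).istitle():
--                         if " ".join(pp[1].split(" ")[:-1]) in sbar[1]:
--                             if pp in res_pp:
--                                 res_pp.remove(pp)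
--         return res_pp
--     else:
--         return pp_list
-- ===== SOURCE B (Python) =====
-- def filter_pp_in_sbar(sbar_list, pp_list):
--     def covered(pp, sbar):
--         words = pp[1].split(" ")
--         return pp[1] in sbar[1] or (
--             " ".join(words[-2:]).istitle() and " ".join(words[:-1]) in sbar[1])
--     return [pp for pp in pp_list
--             if not any(covered(pp, sbar) for sbar in sbar_list)]
-- ===== Notes on version B (the rewrite author's own statement) =====
-- stated objective: simpler
-- what changed: Replaces the mutate-a-copy scheme (nested loops calling res_pp.remove with 'pp in res_pp' dedup guards) by a single pure filtering comprehension over a per-pp predicate any(covered(pp, sbar)); no copy, no mutation, no membership re-scans.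
import Mathlib
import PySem

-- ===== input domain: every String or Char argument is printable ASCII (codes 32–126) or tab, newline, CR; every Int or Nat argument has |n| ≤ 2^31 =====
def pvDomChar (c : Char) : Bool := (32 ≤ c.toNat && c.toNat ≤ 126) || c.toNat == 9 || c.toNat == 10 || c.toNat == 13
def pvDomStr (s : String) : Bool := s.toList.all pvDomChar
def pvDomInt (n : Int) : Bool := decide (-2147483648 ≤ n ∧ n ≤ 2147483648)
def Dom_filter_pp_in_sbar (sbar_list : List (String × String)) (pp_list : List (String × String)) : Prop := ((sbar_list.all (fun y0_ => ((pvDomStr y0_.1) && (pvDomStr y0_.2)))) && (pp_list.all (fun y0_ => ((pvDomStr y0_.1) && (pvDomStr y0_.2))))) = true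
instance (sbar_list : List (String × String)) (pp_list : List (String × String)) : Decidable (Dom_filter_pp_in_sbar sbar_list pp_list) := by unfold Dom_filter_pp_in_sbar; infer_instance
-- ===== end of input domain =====

-- B replaces A's mutate-a-copy scheme (nested loops with res_pp.remove and membership
-- guards) by one pure filtering comprehension over a per-pp predicate; objective: simpler.

-- ===== PORT A =====
-- str.istitle, ported by hand (PySem has no istitle); exact on the ASCII domain,
-- where the cased characters are exactly the letters A-Z a-z.
def pvIsUpperA (c : Char) : Bool := 'A' ≤ c && c ≤ 'Z'
def pvIsLowerA (c : Char) : Bool := 'a' ≤ c && c ≤ 'z'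
def pvIstitleAux : List Char → Bool → Bool → Bool
  | [], _, cased => cased
  | c :: cs, prev, cased =>
    if pvIsUpperA c then (if prev then false else pvIstitleAux cs true true)
    else if pvIsLowerA c then (if prev then pvIstitleAux cs true true else false)
    else pvIstitleAux cs false cased
def pvIstitle (s : String) : Bool := pvIstitleAux s.toList false false

def filter_pp_in_sbar (sbar_list : List (String × String)) (pp_list : List (String × String)) : List (String × String) :=
  if sbar_list.length > 0 then
    pp_list.foldl (fun res pp =>
      sbar_list.foldl (fun r sbar =>
        if PySem.Str.isIn pp.2 sbar.2 then
          (if pp ∈ r then r.erase pp else r)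
        else
          if pvIstitle (PySem.Str.join " " (PySem.List.slice ((PySem.Str.split? pp.2 " ").getD []) (some (-2)) none)) then
            if PySem.Str.isIn (PySem.Str.join " " (PySem.List.slice ((PySem.Str.split? pp.2 " ").getD []) none (some (-1)))) sbar.2 then
              (if pp ∈ r then r.erase pp else r)
            else r
          else r) res) pp_list
  else pp_list

-- ===== PORT B =====
def pvCovered (pp sbar : String × String) : Bool :=
  let words := (PySem.Str.split? pp.2 " ").getD []
  PySem.Str.isIn pp.2 sbar.2 ||
    (pvIstitle (PySem.Str.join " " (PySem.List.slice words (some (-2)) none)) &&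
     PySem.Str.isIn (PySem.Str.join " " (PySem.List.slice words none (some (-1)))) sbar.2)

def filter_pp_in_sbar_alt (sbar_list : List (String × String)) (pp_list : List (String × String)) : List (String × String) :=
  pp_list.filter (fun pp => !(sbar_list.any (fun sbar => pvCovered pp sbar)))

-- ===== PRECONDITION & SPEC =====
def Spec_filter_pp_in_sbar (sbar_list : List (String × String)) (pp_list : List (String × String)) (out : List (String × String)) : Prop := out = filter_pp_in_sbar_alt sbar_list pp_list
instance (sbar_list : List (String × String)) (pp_list : List (String × String)) (out : List (String × String)) : Decidable (Spec_filter_pp_in_sbar sbar_list pp_list out) := by unfold Spec_filter_pp_in_sbar; infer_instance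

-- ===== CLAIM (what is proved, stated in full; the proofs are below) =====
def Claim_equal_filter_pp_in_sbar : Prop := ∀ (sbar_list : List (String × String)) (pp_list : List (String × String)), Dom_filter_pp_in_sbar sbar_list pp_list → Spec_filter_pp_in_sbar sbar_list pp_list (filter_pp_in_sbar sbar_list pp_list)

-- ===== LEMMAS AND PROOFS =====

-- A's inner loop over the sbars, with the removal condition already collapsed to pvCovered
def pvInner (pp : String × String) (sbars : List (String × String)) (r : List (String × String)) : List (String × String) :=
  sbars.foldl (fun r sbar => if pvCovered pp sbar then r.erase pp else r) r

-- A's outer loop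
def pvOuter (sbars : List (String × String)) (rest res : List (String × String)) : List (String × String) :=
  rest.foldl (fun res pp => pvInner pp sbars res) res

lemma pvStepA_eq (pp sbar : String × String) (r : List (String × String)) :
    (if PySem.Str.isIn pp.2 sbar.2 then
        (if pp ∈ r then r.erase pp else r)
      else
        if pvIstitle (PySem.Str.join " " (PySem.List.slice ((PySem.Str.split? pp.2 " ").getD []) (some (-2)) none)) then
          if PySem.Str.isIn (PySem.Str.join " " (PySem.List.slice ((PySem.Str.split? pp.2 " ").getD []) none (some (-1)))) sbar.2 then
            (if pp ∈ r then r.erase pp else r)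
          else r
        else r)
      = if pvCovered pp sbar then r.erase pp else r := by
  have hguard : (if pp ∈ r then r.erase pp else r) = r.erase pp := by
    split_ifs with h
    · rfl
    · exact (List.erase_of_not_mem h).symm
  simp only [pvCovered, hguard]
  split_ifs with h1 h2 h3 h4 h5 h6 <;> simp_all

lemma pvA_eq_pvOuter (sbar_list pp_list : List (String × String)) (h : sbar_list.length > 0) :
    filter_pp_in_sbar sbar_list pp_list = pvOuter sbar_list pp_list pp_list := by
  simp only [filter_pp_in_sbar, if_pos h, pvOuter, pvInner]
  refine List.foldl_ext _ _ _ ?_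
  intro res pp _
  refine List.foldl_ext _ _ _ ?_
  intro r sbar _
  exact pvStepA_eq pp sbar r

lemma pvInner_sublist (pp : String × String) (sbars r : List (String × String)) :
    (pvInner pp sbars r).Sublist r := by
  induction sbars generalizing r with
  | nil => exact List.Sublist.refl r
  | cons s ss ih =>
    simp only [pvInner, List.foldl_cons]
    refine (ih _).trans ?_
    split_ifs
    · exact List.erase_sublist
    · exact List.Sublist.refl r

lemma pvInner_count_le (pp x : String × String) (sbars r : List (String × String)) :
    (pvInner pp sbars r).count x ≤ r.count x :=
  (pvInner_sublist pp sbars r).count_le x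

lemma pvInner_count_of_ne (pp x : String × String) (sbars r : List (String × String)) (h : x ≠ pp) :
    (pvInner pp sbars r).count x = r.count x := by
  induction sbars generalizing r with
  | nil => rfl
  | cons s ss ih =>
    simp only [pvInner, List.foldl_cons] at *
    rw [ih]
    split_ifs
    · exact List.count_erase_of_ne h
    · rfl

lemma pvInner_count_hit (pp : String × String) (sbars r : List (String × String))
    (h : ∃ s ∈ sbars, pvCovered pp s = true) :
    (pvInner pp sbars r).count pp ≤ r.count pp - 1 := by
  induction sbars generalizing r with
  | nil => simp at h
  | cons s ss ih =>
    simp only [pvInner, List.foldl_cons] at *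
    by_cases hc : pvCovered pp s = true
    · rw [if_pos hc]
      have := pvInner_count_le pp pp ss (r.erase pp)
      have he : (r.erase pp).count pp = r.count pp - 1 := List.count_erase_self
      simp only [pvInner] at this
      omega
    · rw [if_neg hc]
      rcases h with ⟨t, ht, hcov⟩
      rcases List.mem_cons.mp ht with rfl | ht'
      · exact absurd hcov hc
      · exact ih r ⟨t, ht', hcov⟩

-- erasing an element the predicate rejects leaves the filtered list unchanged
lemma pvFilter_erase (p : (String × String) → Bool) (a : String × String)
    (l : List (String × String)) (hp : p a = false) :
    (l.erase a).filter p = l.filter p := by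
  induction l with
  | nil => rfl
  | cons b l ih =>
    by_cases hb : b = a
    · subst hb
      simp [List.erase_cons_head, hp]
    · rw [List.erase_cons_tail (by simp [hb])]
      simp [List.filter_cons, ih]

lemma pvInner_filter (sbar_list : List (String × String)) (pp : String × String)
    (sbars r : List (String × String)) (hs : ∀ s ∈ sbars, s ∈ sbar_list) :
    (pvInner pp sbars r).filter (fun x => !(sbar_list.any (fun sbar => pvCovered x sbar)))
      = r.filter (fun x => !(sbar_list.any (fun sbar => pvCovered x sbar))) := by
  induction sbars generalizing r with
  | nil => rfl
  | cons s ss ih =>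
    simp only [pvInner, List.foldl_cons] at *
    rw [ih _ (fun t ht => hs t (List.mem_cons_of_mem s ht))]
    split_ifs with hc
    · refine pvFilter_erase _ _ _ ?_
      simp only [Bool.not_eq_false', List.any_eq_true]
      exact ⟨s, hs s List.mem_cons_self, hc⟩
    · rfl

lemma pvOuter_count_le (sbars : List (String × String)) (x : String × String)
    (hx : ∃ s ∈ sbars, pvCovered x s = true) (rest res : List (String × String)) :
    (pvOuter sbars rest res).count x ≤ res.count x - rest.count x := by
  induction rest generalizing res with
  | nil => simp [pvOuter]
  | cons pp rest' ih =>
    simp only [pvOuter, List.foldl_cons] at *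
    by_cases hpp : pp = x
    · subst hpp
      have h1 := pvInner_count_hit pp (sbars := sbars) res hx
      have h2 := ih (pvInner pp sbars res)
      have hc : (pp :: rest').count pp = rest'.count pp + 1 := List.count_cons_self
      omega
    · have h1 := pvInner_count_of_ne pp x sbars res (fun h => hpp h.symm)
      have h2 := ih (pvInner pp sbars res)
      have hc : (pp :: rest').count x = rest'.count x :=
        List.count_cons_of_ne hpp
      omega

lemma pvOuter_filter (sbars rest res : List (String × String)) :
    (pvOuter sbars rest res).filter (fun x => !(sbars.any (fun sbar => pvCovered x sbar)))
      = res.filter (fun x => !(sbars.any (fun sbar => pvCovered x sbar))) := by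
  induction rest generalizing res with
  | nil => rfl
  | cons pp rest' ih =>
    simp only [pvOuter, List.foldl_cons] at *
    rw [ih (pvInner pp sbars res), pvInner_filter sbars pp sbars res (fun _ h => h)]

lemma pvOuter_eq_filter (sbars pp_list : List (String × String)) :
    pvOuter sbars pp_list pp_list
      = pp_list.filter (fun x => !(sbars.any (fun sbar => pvCovered x sbar))) := by
  set p : (String × String) → Bool := fun x => !(sbars.any (fun sbar => pvCovered x sbar)) with hp
  have hall : ∀ x ∈ pvOuter sbars pp_list pp_list, p x = true := by
    intro x hxmem
    by_contra hfalse
    have hbad : ∃ s ∈ sbars, pvCovered x s = true := by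
      simp only [hp, Bool.not_eq_true', Bool.not_eq_false] at hfalse
      simpa [List.any_eq_true] using hfalse
    have h0 := pvOuter_count_le sbars x hbad pp_list pp_list
    have h1 : 0 < (pvOuter sbars pp_list pp_list).count x := List.count_pos_iff.mpr hxmem
    omega
  calc pvOuter sbars pp_list pp_list
      = (pvOuter sbars pp_list pp_list).filter p := (List.filter_eq_self.mpr hall).symm
    _ = pp_list.filter p := pvOuter_filter sbars pp_list pp_list

-- ===== VERDICT (by name: the statement is the Claim_ definition above) =====
theorem filter_pp_in_sbar_spec : Claim_equal_filter_pp_in_sbar := by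
  intro sbar_list pp_list _
  unfold Spec_filter_pp_in_sbar filter_pp_in_sbar_alt
  by_cases h : sbar_list.length > 0
  · rw [pvA_eq_pvOuter sbar_list pp_list h, pvOuter_eq_filter]
  · have hnil : sbar_list = [] := List.eq_nil_of_length_eq_zero (by omega)
    subst hnil
    simp [filter_pp_in_sbar]
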